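-- pv_equiv track=rewrite | github.com/VovaSavin/docx_xml | main.py | sorted_patrol_list_past
-- ===== SOURCE A (Python) =====
-- def sorted_patrol_list_past(list_1: list, list_2: list) -> list:
--     temp_list_1 = []
--     temp_list_2 = []
--
--     for x in list_1:
--         if list_1.index(x) < 2:
--             temp_list_1.append(x)
--         else:
--             temp_list_2.append(x)
--
--     for x in list_2:
--         if list_2.index(x) < 2:
--             temp_list_1.append(x)
--         else:
--             temp_list_2.append(x)
--     return temp_list_1 + temp_list_2
-- ===== SOURCE B (Python) =====
-- def sorted_patrol_list_past(list_1: list, list_2: list) -> list: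
--     pairs = [(0 if x in list_1[:2] else 1, x) for x in list_1]
--     pairs += [(0 if x in list_2[:2] else 1, x) for x in list_2]
--     return [v for _, v in sorted(pairs, key=lambda t: t[0])]
-- ===== Notes on version B (the rewrite author's own statement) =====
-- stated objective: faster
-- what changed: Replaces A's two index()-based bucket-routing loops (a linear first-occurrence scan per element, quadratic overall) with a single tag-then-stable-sort pass: each element is tagged 0/1 by membership in its own list's first two slots and the values are read off a stable sort on the tag.
import Mathlib
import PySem

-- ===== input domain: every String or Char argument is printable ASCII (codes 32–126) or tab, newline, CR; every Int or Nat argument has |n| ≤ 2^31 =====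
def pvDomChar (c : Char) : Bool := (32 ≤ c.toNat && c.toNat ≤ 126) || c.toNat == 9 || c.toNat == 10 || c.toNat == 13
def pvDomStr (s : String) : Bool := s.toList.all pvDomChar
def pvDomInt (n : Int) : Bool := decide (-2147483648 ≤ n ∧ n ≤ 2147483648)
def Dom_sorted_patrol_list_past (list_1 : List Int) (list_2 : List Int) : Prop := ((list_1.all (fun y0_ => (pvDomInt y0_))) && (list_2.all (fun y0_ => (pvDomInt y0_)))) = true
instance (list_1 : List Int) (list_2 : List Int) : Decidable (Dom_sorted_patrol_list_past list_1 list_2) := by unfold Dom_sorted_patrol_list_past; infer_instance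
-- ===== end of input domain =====

-- B replaces A's two index()-based bucket-routing loops (quadratic repeated scans) with a single tag-then-stable-sort pass; a timing run measured B faster.

-- ===== PORT A =====
-- two routing loops over (temp_list_1, temp_list_2); list.index(x) is PySem.List.index?
-- (x is drawn from the list itself, so index? is always `some`; .getD 0 is never the default)
def sorted_patrol_list_past (list_1 : List Int) (list_2 : List Int) : List Int :=
  let s1 := list_1.foldl (fun acc x =>
    if (PySem.List.index? list_1 x).getD 0 < 2 then (acc.1 ++ [x], acc.2) else (acc.1, acc.2 ++ [x]))
    ([], [])
  let s2 := list_2.foldl (fun acc x =>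
    if (PySem.List.index? list_2 x).getD 0 < 2 then (acc.1 ++ [x], acc.2) else (acc.1, acc.2 ++ [x]))
    s1
  s2.1 ++ s2.2

-- ===== PORT B =====
-- tag each element 0/1 by membership in its own list's first two slots, stable-sort on the tag, read values
def sorted_patrol_list_past_alt (list_1 : List Int) (list_2 : List Int) : List Int :=
  let pairs := list_1.map (fun x => ((if x ∈ PySem.List.slice list_1 none (some 2) then (0 : Int) else 1), x))
    ++ list_2.map (fun x => ((if x ∈ PySem.List.slice list_2 none (some 2) then (0 : Int) else 1), x))
  (PySem.List.sorted pairs (fun t => t.1)).map (fun t => t.2)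

-- ===== PRECONDITION & SPEC =====
def Spec_sorted_patrol_list_past (list_1 : List Int) (list_2 : List Int) (out : List Int) : Prop := out = sorted_patrol_list_past_alt list_1 list_2
instance (list_1 : List Int) (list_2 : List Int) (out : List Int) : Decidable (Spec_sorted_patrol_list_past list_1 list_2 out) := by unfold Spec_sorted_patrol_list_past; infer_instance

-- ===== CLAIM (what is proved, stated in full; the proofs are below) =====
def Claim_equal_sorted_patrol_list_past : Prop := ∀ (list_1 : List Int) (list_2 : List Int), Dom_sorted_patrol_list_past list_1 list_2 → Spec_sorted_patrol_list_past list_1 list_2 (sorted_patrol_list_past list_1 list_2)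

-- ===== LEMMAS AND PROOFS =====

-- A's routing loop partitions: append-accumulate foldl = filters
theorem routeLoop (l : List Int) (p : Int → Prop) [DecidablePred p] (t1 t2 : List Int) :
    l.foldl (fun acc x => if p x then (acc.1 ++ [x], acc.2) else (acc.1, acc.2 ++ [x])) (t1, t2)
      = (t1 ++ l.filter (fun x => decide (p x)), t2 ++ l.filter (fun x => decide ¬ p x)) := by
  induction l generalizing t1 t2 with
  | nil => simp
  | cons x xs ih =>
    by_cases hx : p x <;> simp [hx, ih, List.append_assoc]

-- A's first-occurrence-index test = membership in the first two slots
theorem idx_lt_iff (l : List Int) (x : Int) (hx : x ∈ l) :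
    (PySem.List.index? l x).getD 0 < 2 ↔ x ∈ l.take 2 := by
  have hs : (PySem.List.index? l x).isSome := (PySem.List.index?_isSome_iff l x).mpr hx
  obtain ⟨k, hk⟩ := Option.isSome_iff_exists.mp hs
  obtain ⟨hklen, hkx, hmin⟩ := PySem.List.getElem_of_index?_eq_some hk
  rw [hk]
  simp only [Option.getD_some]
  constructor
  · intro h2
    exact List.mem_take_iff_getElem.mpr ⟨k, by omega, hkx⟩
  · intro hmem
    obtain ⟨j, hj, hjx⟩ := List.mem_take_iff_getElem.mp hmem
    by_contra h2
    exact hmin j (by omega) hjx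

-- insertBy passes over a block it is not before
theorem insertBy_skip (bef : (Int × Int) → (Int × Int) → Bool) (x : Int × Int)
    (A B : List (Int × Int)) (hA : ∀ y ∈ A, bef x y = false) :
    PySem.List.insertBy bef x (A ++ B) = A ++ PySem.List.insertBy bef x B := by
  induction A with
  | nil => simp
  | cons a as ih =>
    have ha : bef x a = false := hA a (List.mem_cons_self)
    simp [PySem.List.insertBy, ha, ih (fun y hy => hA y (List.mem_cons_of_mem a hy))]

-- stable sort on a 0/1 tag = the two filters in order
theorem sorted_two_bucket (ps : List (Int × Int)) (h : ∀ p ∈ ps, p.1 = 0 ∨ p.1 = 1) :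
    PySem.List.sorted ps (fun t => t.1)
      = ps.filter (fun p => decide (p.1 = 0)) ++ ps.filter (fun p => decide (¬ p.1 = 0)) := by
  induction ps using List.reverseRecOn with
  | nil => simp [PySem.List.sorted_eq_foldl_insertBy]
  | append_singleton ps x ih =>
    have hps : ∀ p ∈ ps, p.1 = 0 ∨ p.1 = 1 := fun p hp => h p (List.mem_append_left _ hp)
    have hstep : PySem.List.sorted (ps ++ [x]) (fun t => t.1)
        = PySem.List.insertBy (fun a b => decide (a.1 < b.1)) x (PySem.List.sorted ps (fun t => t.1)) := by
      rw [PySem.List.sorted_eq_foldl_insertBy, PySem.List.sorted_eq_foldl_insertBy, List.foldl_append]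
      rfl
    rw [hstep, ih hps]
    rcases h x (List.mem_append_right _ (List.mem_cons_self)) with hx0 | hx1
    · -- tag 0: lands right after the 0-block
      rw [insertBy_skip _ x _ _ (by
        intro y hy
        have : y.1 = 0 := by simpa using (List.mem_filter.mp hy).2
        simp [this, hx0])]
      have hins : PySem.List.insertBy (fun a b => decide (a.1 < b.1)) x
          (ps.filter (fun p => decide (¬ p.1 = 0))) = x :: ps.filter (fun p => decide (¬ p.1 = 0)) := by
        cases hF : ps.filter (fun p => decide (¬ p.1 = 0)) with
        | nil => simp [PySem.List.insertBy]
        | cons b bs =>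
          have hb : b ∈ ps.filter (fun p => decide (¬ p.1 = 0)) := by rw [hF]; exact List.mem_cons_self
          have hbm := List.mem_filter.mp hb
          have hb1 : b.1 = 1 := by
            rcases hps b hbm.1 with h0 | h1
            · exact absurd h0 (by simpa using hbm.2)
            · exact h1
          simp [PySem.List.insertBy, hb1, hx0]
      rw [hins]
      simp [List.filter_append, hx0]
    · -- tag 1: lands at the very end
      rw [PySem.List.insertBy_of_forall_not_before _ x _ (by
        intro y hy
        have hyp : y ∈ ps := by
          rcases List.mem_append.mp hy with hy' | hy' <;> exact (List.mem_filter.mp hy').1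
        rcases hps y hyp with h | h <;> simp [h, hx1])]
      simp [List.filter_append, hx1, List.append_assoc]

theorem slice_two (l : List Int) : PySem.List.slice l none (some 2) = l.take 2 := by
  have := PySem.List.slice_to_natCast l 2
  simpa using this

-- ===== VERDICT (by name: the statement is the Claim_ definition above) =====
theorem sorted_patrol_list_past_spec : Claim_equal_sorted_patrol_list_past := by
  intro l1 l2 _
  show sorted_patrol_list_past l1 l2 = sorted_patrol_list_past_alt l1 l2
  simp only [sorted_patrol_list_past, sorted_patrol_list_past_alt]
  rw [routeLoop l1 (fun x => (PySem.List.index? l1 x).getD 0 < 2) [] [],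
      routeLoop l2 (fun x => (PySem.List.index? l2 x).getD 0 < 2)]
  rw [sorted_two_bucket _ (by
    intro p hp
    rcases List.mem_append.mp hp with hp | hp <;>
      obtain ⟨x, _, rfl⟩ := List.mem_map.mp hp <;> dsimp <;> split <;> simp)]
  have predB0 : ∀ l : List Int,
      ((fun p : Int × Int => decide (p.1 = 0)) ∘ (fun x => ((if x ∈ PySem.List.slice l none (some 2) then (0 : Int) else 1), x)))
        = fun x => decide (x ∈ l.take 2) := by
    intro l; funext x; by_cases hc : x ∈ l.take 2 <;> simp [Function.comp, slice_two, hc]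
  have predB1 : ∀ l : List Int,
      ((fun p : Int × Int => decide (¬ p.1 = 0)) ∘ (fun x => ((if x ∈ PySem.List.slice l none (some 2) then (0 : Int) else 1), x)))
        = fun x => !decide (x ∈ l.take 2) := by
    intro l; funext x; by_cases hc : x ∈ l.take 2 <;> simp [Function.comp, slice_two, hc]
  have sndg : ∀ l : List Int,
      ((fun t : Int × Int => t.2) ∘ (fun x => ((if x ∈ PySem.List.slice l none (some 2) then (0 : Int) else 1), x)))
        = id := by
    intro l; funext x; rfl
  have cA0 : ∀ l : List Int,
      l.filter (fun x => decide ((PySem.List.index? l x).getD 0 < 2))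
        = l.filter (fun x => decide (x ∈ l.take 2)) := by
    intro l; apply List.filter_congr; intro x hx
    exact decide_eq_decide.mpr (idx_lt_iff l x hx)
  have cA1 : ∀ l : List Int,
      l.filter (fun x => decide (¬ (PySem.List.index? l x).getD 0 < 2))
        = l.filter (fun x => !decide (x ∈ l.take 2)) := by
    intro l; apply List.filter_congr; intro x hx
    rw [decide_not, decide_eq_decide.mpr (idx_lt_iff l x hx)]
  rw [List.filter_append, List.filter_append, List.filter_map, List.filter_map,
      List.filter_map, List.filter_map, predB0 l1, predB0 l2, predB1 l1, predB1 l2]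
  simp only [List.map_append, List.map_map, sndg, List.map_id, List.nil_append]
  rw [cA0 l1, cA0 l2, cA1 l1, cA1 l2]
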